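-- pv_equiv track=rewrite | github.com/hollomancer/sbir-analytics | src/utils/reporting/formats/markdown_processor.py | _truncate_markdown
-- ===== SOURCE A (Python) =====
-- def _truncate_markdown(content: str, max_length: int) -> str:
--     """Truncate markdown content while preserving structure.
--
--     Args:
--         content: Markdown content to truncate
--         max_length: Maximum length allowed
--
--     Returns:
--         Truncated markdown content
--     """
--     if len(content) <= max_length:
--         return content
--
--     # Find a good truncation point (end of a section)
--     lines = content.split("\n")
--     truncated_lines = []
--     current_length = 0
--
--     for line in lines:
--         if current_length + len(line) + 1 > max_length - 50:  # Leave room for truncation note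
--             break
--         truncated_lines.append(line)
--         current_length += len(line) + 1
--
--     # Add truncation indicator
--     truncated_lines.append("")
--     truncated_lines.append("*... (truncated due to length)*")
--
--     return "\n".join(truncated_lines)
-- ===== SOURCE B (Python) =====
-- def _truncate_markdown(content: str, max_length: int) -> str:
--     """Truncate markdown at a line boundary under the length budget.
--
--     Builds the full prefix-sum table of cumulative line costs (len(line)+1)
--     and binary-searches it for the truncation boundary, instead of an
--     accumulate-and-break loop.
--     """
--     if len(content) <= max_length:
--         return content
--
--     lines = content.split("\n")
--
--     # Prefix sums: cum[i] = total cost of keeping lines[0..i].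
--     cum = []
--     total = 0
--     for line in lines:
--         total += len(line) + 1
--         cum.append(total)
--
--     # Binary search: number of leading entries of cum that fit the budget.
--     budget = max_length - 50
--     lo, hi = 0, len(cum)
--     while lo < hi:
--         mid = (lo + hi) // 2
--         if cum[mid] <= budget:
--             lo = mid + 1
--         else:
--             hi = mid
--
--     return "\n".join(lines[:lo] + ["", "*... (truncated due to length)*"])
-- ===== Notes on version B (the rewrite author's own statement) =====
-- stated objective: alternative
-- what changed: Replaced the accumulate-and-break loop with building a full prefix-sum table of line costs and binary-searching it for the largest prefix that fits the budget.
import Mathlib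
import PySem

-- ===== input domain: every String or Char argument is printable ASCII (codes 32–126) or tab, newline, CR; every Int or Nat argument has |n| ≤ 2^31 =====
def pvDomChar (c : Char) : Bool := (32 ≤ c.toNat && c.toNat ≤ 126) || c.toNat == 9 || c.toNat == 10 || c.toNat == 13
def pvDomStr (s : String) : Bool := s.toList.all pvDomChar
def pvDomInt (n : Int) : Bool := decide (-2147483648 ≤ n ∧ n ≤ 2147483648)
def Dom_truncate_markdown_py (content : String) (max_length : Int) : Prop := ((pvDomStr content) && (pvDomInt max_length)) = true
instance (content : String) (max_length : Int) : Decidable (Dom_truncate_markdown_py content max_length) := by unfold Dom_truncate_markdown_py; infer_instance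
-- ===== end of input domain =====

-- B replaces A's accumulate-and-break loop by a prefix-sum table plus a binary search for the boundary (alternative decomposition, not claimed faster).

-- ===== PORT A =====
-- the for-loop with break: keep lines while the running cost fits the budget
def truncAuxA (budget : Int) : List String → Int → List String
  | [], _ => []
  | l :: ls, cur =>
    if cur + PySem.Str.len l + 1 > budget then []
    else l :: truncAuxA budget ls (cur + PySem.Str.len l + 1)

def truncate_markdown_py (content : String) (max_length : Int) : String :=
  if PySem.Str.len content ≤ max_length then content
  else
    let lines := (PySem.Str.split? content "\n").getD []
    let truncated_lines := truncAuxA (max_length - 50) lines 0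
      ++ ["", "*... (truncated due to length)*"]
    PySem.Str.join "\n" truncated_lines

-- ===== PORT B =====
-- prefix-sum table of cumulative line costs
def cumB : List String → Int → List Int
  | [], _ => []
  | l :: ls, t => (t + PySem.Str.len l + 1) :: cumB ls (t + PySem.Str.len l + 1)

-- the while-loop binary search of Source B; the first argument is the structural
-- termination bound hi - lo (each iteration shrinks the interval by at least one)
def bsearchGo (cum : List Int) (budget : Int) : Nat → Nat → Nat → Nat
  | 0, lo, _ => lo
  | fuel + 1, lo, hi =>
    if lo < hi then
      if cum.getD ((lo + hi) / 2) 0 ≤ budget then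
        bsearchGo cum budget fuel ((lo + hi) / 2 + 1) hi
      else bsearchGo cum budget fuel lo ((lo + hi) / 2)
    else lo

def bsearchB (cum : List Int) (budget : Int) (lo hi : Nat) : Nat :=
  bsearchGo cum budget (hi - lo) lo hi

def truncate_markdown_py_alt (content : String) (max_length : Int) : String :=
  if PySem.Str.len content ≤ max_length then content
  else
    let lines := (PySem.Str.split? content "\n").getD []
    let cum := cumB lines 0
    let budget := max_length - 50
    let lo := bsearchB cum budget 0 cum.length
    PySem.Str.join "\n" (lines.take lo ++ ["", "*... (truncated due to length)*"])

-- ===== PRECONDITION & SPEC =====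
def Spec_truncate_markdown_py (content : String) (max_length : Int) (out : String) : Prop := out = truncate_markdown_py_alt content max_length
instance (content : String) (max_length : Int) (out : String) : Decidable (Spec_truncate_markdown_py content max_length out) := by unfold Spec_truncate_markdown_py; infer_instance

-- ===== CLAIM (what is proved, stated in full; the proofs are below) =====
def Claim_equal_truncate_markdown_py : Prop := ∀ (content : String) (max_length : Int), Dom_truncate_markdown_py content max_length → Spec_truncate_markdown_py content max_length (truncate_markdown_py content max_length)

-- ===== LEMMAS AND PROOFS =====

theorem len_nonneg (s : String) : 0 ≤ PySem.Str.len s := by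
  simp [PySem.Str.len_eq]

theorem cumB_length (ls : List String) (t : Int) : (cumB ls t).length = ls.length := by
  induction ls generalizing t with
  | nil => simp [cumB]
  | cons l ls ih => simp [cumB, ih]

-- every entry of the prefix-sum table is ≥ the start value
theorem cumB_lb (ls : List String) (t : Int) (i : Nat) (hi : i < ls.length) :
    t ≤ (cumB ls t).getD i 0 := by
  induction ls generalizing t i with
  | nil => simp at hi
  | cons l ls ih =>
    cases i with
    | zero =>
      have := len_nonneg l
      simp only [cumB, List.getD_cons_zero]
      omega
    | succ i =>
      have h1 : t + PySem.Str.len l + 1 ≤ (cumB ls (t + PySem.Str.len l + 1)).getD i 0 :=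
        ih _ _ (by simpa using hi)
      have := len_nonneg l
      simp only [cumB, List.getD_cons_succ]
      omega

-- the prefix-sum table is monotone
theorem cumB_mono (ls : List String) (t : Int) (i j : Nat) (hij : i ≤ j) (hj : j < ls.length) :
    (cumB ls t).getD i 0 ≤ (cumB ls t).getD j 0 := by
  induction ls generalizing t i j with
  | nil => simp at hj
  | cons l ls ih =>
    cases i with
    | zero =>
      cases j with
      | zero => simp
      | succ j =>
        have := cumB_lb ls (t + PySem.Str.len l + 1) j (by simpa using hj)
        simp only [cumB, List.getD_cons_zero, List.getD_cons_succ]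
        omega
    | succ i =>
      cases j with
      | zero => omega
      | succ j =>
        have := ih (t + PySem.Str.len l + 1) i j (by omega) (by simpa using hj)
        simpa only [cumB, List.getD_cons_succ] using this

-- takeWhile facts (over getD)
theorem tw_le {α : Type} (p : α → Bool) (l : List α) : (l.takeWhile p).length ≤ l.length := by
  induction l with
  | nil => simp
  | cons a l ih =>
    by_cases h : p a
    · simp [List.takeWhile, h]; omega
    · simp [List.takeWhile, h]

theorem tw_true (p : Int → Bool) (l : List Int) (i : Nat)
    (h : i < (l.takeWhile p).length) : p (l.getD i 0) = true := by
  induction l generalizing i with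
  | nil => simp [List.takeWhile] at h
  | cons a l ih =>
    by_cases hp : p a
    · cases i with
      | zero => simpa using hp
      | succ i =>
        simp [List.takeWhile, hp] at h
        simpa using ih i (by omega)
    · simp [List.takeWhile, hp] at h

theorem tw_false (p : Int → Bool) (l : List Int)
    (h : (l.takeWhile p).length < l.length) :
    p (l.getD (l.takeWhile p).length 0) = false := by
  induction l with
  | nil => simp at h
  | cons a l ih =>
    by_cases hp : p a
    · simp [List.takeWhile, hp] at h ⊢
      exact ih (by omega)
    · simp [List.takeWhile, hp]

-- A's loop keeps exactly the lines whose cumulative cost fits the budget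
theorem truncAuxA_eq (budget : Int) (ls : List String) (cur : Int) :
    truncAuxA budget ls cur
      = ls.take ((cumB ls cur).takeWhile (fun x => decide (x ≤ budget))).length := by
  induction ls generalizing cur with
  | nil => simp [truncAuxA]
  | cons l ls ih =>
    by_cases h : cur + PySem.Str.len l + 1 > budget
    · have hd : decide (cur + PySem.Str.len l + 1 ≤ budget) = false := by
        simp only [decide_eq_false_iff_not, not_le]; omega
      simp only [truncAuxA, if_pos h, cumB, List.takeWhile_cons, hd, Bool.false_eq_true,
        if_false, List.length_nil, List.take_zero]
    · have hd : decide (cur + PySem.Str.len l + 1 ≤ budget) = true := by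
        simp only [decide_eq_true_eq]; omega
      simp only [truncAuxA, if_neg h, cumB, List.takeWhile_cons, hd, if_true,
        List.length_cons, List.take_succ_cons, ih]

-- binary-search correctness against the takeWhile boundary, under monotonicity
theorem bsearchGo_eq (cum : List Int) (budget : Int) (fuel lo hi : Nat)
    (mono : ∀ i j, i ≤ j → j < cum.length → cum.getD i 0 ≤ cum.getD j 0)
    (hfuel : hi - lo ≤ fuel)
    (hhi : hi ≤ cum.length)
    (hlo : lo ≤ (cum.takeWhile (fun x => decide (x ≤ budget))).length)
    (hk : (cum.takeWhile (fun x => decide (x ≤ budget))).length ≤ hi) :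
    bsearchGo cum budget fuel lo hi = (cum.takeWhile (fun x => decide (x ≤ budget))).length := by
  set k := (cum.takeWhile (fun x => decide (x ≤ budget))).length with hkdef
  induction fuel generalizing lo hi with
  | zero => simp only [bsearchGo]; omega
  | succ fuel ih =>
    by_cases h : lo < hi
    · have hmlt : (lo + hi) / 2 < hi := by omega
      have hmlen : (lo + hi) / 2 < cum.length := by omega
      by_cases hle : cum.getD ((lo + hi) / 2) 0 ≤ budget
      · have hmk : (lo + hi) / 2 < k := by
          by_contra hc
          have hkl : k < cum.length := by omega
          have hf := tw_false (fun x => decide (x ≤ budget)) cum hkl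
          rw [← hkdef] at hf
          simp only [decide_eq_false_iff_not, not_le] at hf
          have := mono k ((lo + hi) / 2) (by omega) hmlen
          omega
        simp only [bsearchGo, if_pos h, if_pos hle]
        exact ih ((lo + hi) / 2 + 1) hi (by omega) (by omega) (by omega) hk
      · have hkm : k ≤ (lo + hi) / 2 := by
          by_contra hc
          have := tw_true (fun x => decide (x ≤ budget)) cum ((lo + hi) / 2) (by omega)
          simp only [decide_eq_true_eq] at this
          omega
        simp only [bsearchGo, if_pos h, if_neg hle]
        exact ih lo ((lo + hi) / 2) (by omega) (by omega) hlo hkm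
    · simp only [bsearchGo, if_neg h]
      omega

theorem bsearchB_eq (cum : List Int) (budget : Int)
    (mono : ∀ i j, i ≤ j → j < cum.length → cum.getD i 0 ≤ cum.getD j 0)
    (hk : (cum.takeWhile (fun x => decide (x ≤ budget))).length ≤ cum.length) :
    bsearchB cum budget 0 cum.length = (cum.takeWhile (fun x => decide (x ≤ budget))).length := by
  unfold bsearchB
  exact bsearchGo_eq cum budget _ 0 cum.length mono (by omega) (le_refl _) (by omega) hk

-- ===== VERDICT (by name: the statement is the Claim_ definition above) =====
theorem truncate_markdown_py_spec : Claim_equal_truncate_markdown_py := by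
  intro content max_length _
  unfold Spec_truncate_markdown_py truncate_markdown_py truncate_markdown_py_alt
  by_cases h : PySem.Str.len content ≤ max_length
  · rw [if_pos h, if_pos h]
  · rw [if_neg h, if_neg h]
    set lines := (PySem.Str.split? content "\n").getD [] with hlines
    set cum := cumB lines 0 with hcum
    set k := (cum.takeWhile (fun x => decide (x ≤ max_length - 50))).length with hk
    have h1 : truncAuxA (max_length - 50) lines 0 = lines.take k :=
      truncAuxA_eq (max_length - 50) lines 0
    have h2 : bsearchB cum (max_length - 50) 0 cum.length = k := by
      apply bsearchB_eq
      · intro i j hij hj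
        exact cumB_mono lines 0 i j hij (by simpa [hcum, cumB_length] using hj)
      · exact tw_le _ _
    simp only [h1]
    rw [← hcum, h2]
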